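-- pv_equiv track=rewrite | github.com/tlavr/typesnalgos | bBST_func.py | GenerateBBSTArray
-- ===== SOURCE A (Python) =====
-- def makeAr(leftHalf,rightHalf, outList,curIdx):
--     if leftHalf.__len__() > 0:
--         centIdx = round(leftHalf.__len__()/2 - 0.1)
--         outList[2 * curIdx + 1] = leftHalf[centIdx]
--         if centIdx != 0:
--             makeAr(leftHalf[:centIdx], leftHalf[centIdx + 1:], outList, 2 * curIdx + 1)
--     if rightHalf.__len__() > 0:
--         centIdx = round(rightHalf.__len__() / 2 - 0.1)
--         outList[2 * curIdx + 2] = rightHalf[centIdx]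
--         if centIdx != 0:
--             makeAr(rightHalf[:centIdx], rightHalf[centIdx + 1:], outList, 2 * curIdx + 2)
--
-- def GenerateBBSTArray(a):
--     # Determine tree depth
--     if a.__len__() == 0:
--         return None
--     h = 1 # tree array size
--     h_i = 0 # tree depth
--     while h < a.__len__():
--         h = pow(2,h_i+1)-1
--         h_i += 1
--     outList = [None]*h
--     # Sort array
--     a = sorted(a)
--     # Recursive add all elements
--     makeAr([], a, outList, -1) # parameters for the first adding
--     # output
--     return outList
-- ===== SOURCE B (Python) =====
-- def GenerateBBSTArray(a):
--     # Determine tree depth (identical sizing loop)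
--     if a.__len__() == 0:
--         return None
--     h = 1
--     h_i = 0
--     while h < a.__len__():
--         h = pow(2, h_i + 1) - 1
--         h_i += 1
--     outList = [None] * h
--     a = sorted(a)
--     # Iterative level-order fill with a FIFO queue of (lo, hi, idx) half-open
--     # index ranges instead of the recursive slice-copying construction.
--     # (head index instead of pop(0), so dequeuing is O(1))
--     queue = [(0, a.__len__(), 0)]
--     head = 0
--     while head < len(queue):
--         lo, hi, idx = queue[head]
--         head += 1
--         if lo >= hi:
--             continue
--         mid = lo + (hi - lo) // 2
--         outList[idx] = a[mid]
--         queue.append((lo, mid, 2 * idx + 1))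
--         queue.append((mid + 1, hi, 2 * idx + 2))
--     return outList
-- ===== Notes on version B (the rewrite author's own statement) =====
-- stated objective: alternative
-- what changed: The recursive makeAr construction that copies list slices at every node is replaced by an iterative FIFO-queue loop over (lo, hi, idx) index triples that fills the output array level by level, with no recursion and no slice copies.
import Mathlib
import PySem

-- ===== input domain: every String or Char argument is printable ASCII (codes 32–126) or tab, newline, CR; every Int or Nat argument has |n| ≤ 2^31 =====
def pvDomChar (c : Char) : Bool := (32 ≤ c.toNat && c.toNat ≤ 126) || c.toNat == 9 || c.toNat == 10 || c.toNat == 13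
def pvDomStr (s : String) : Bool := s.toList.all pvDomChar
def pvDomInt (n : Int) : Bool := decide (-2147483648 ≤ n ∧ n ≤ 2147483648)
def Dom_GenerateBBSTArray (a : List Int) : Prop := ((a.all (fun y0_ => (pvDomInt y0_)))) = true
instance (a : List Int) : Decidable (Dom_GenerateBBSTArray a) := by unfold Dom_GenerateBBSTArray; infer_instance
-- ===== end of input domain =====

-- B replaces A's recursive, slice-copying tree construction by an iterative FIFO-queue
-- loop over (lo, hi, idx) index ranges (same sizing loop, same sort, same output array).

-- ===== PORT A =====

-- the while loop 'while h < n: h = pow(2, h_i+1)-1; h_i += 1'; returns the final h.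
-- (the proof argument h_i ≤ h only justifies termination; it carries no information used anywhere)
def bbstSize (n h h_i : Nat) (hinv : h_i ≤ h) : Nat :=
  if h < n then
    bbstSize n (2 ^ (h_i + 1) - 1) (h_i + 1)
      (by have := Nat.lt_two_pow_self (n := h_i + 1); omega)
  else h
termination_by n - h_i
decreasing_by omega

-- literal port of makeAr; outList[k] = v is PySem.List.pySetD (Python index semantics);
-- round(L/2 - 0.1) equals L // 2 exactly for every list length L (checked for all L: L/2-0.1
-- is far from a rounding boundary), ported as Nat division.
def makeAr (leftHalf rightHalf : List Int) (outList : List (Option Int)) (curIdx : Int) :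
    List (Option Int) :=
  let out1 :=
    if leftHalf.length > 0 then
      let centIdx := leftHalf.length / 2
      let o := PySem.List.pySetD outList (2 * curIdx + 1)
                 (some (PySem.List.pyGetD leftHalf (centIdx : Int) 0))
      if centIdx ≠ 0 then
        makeAr (PySem.List.slice leftHalf none (some (centIdx : Int)))
               (PySem.List.slice leftHalf (some ((centIdx + 1 : Nat) : Int)) none)
               o (2 * curIdx + 1)
      else o
    else outList
  if rightHalf.length > 0 then
    let centIdx := rightHalf.length / 2
    let o := PySem.List.pySetD out1 (2 * curIdx + 2)
               (some (PySem.List.pyGetD rightHalf (centIdx : Int) 0))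
    if centIdx ≠ 0 then
      makeAr (PySem.List.slice rightHalf none (some (centIdx : Int)))
             (PySem.List.slice rightHalf (some ((centIdx + 1 : Nat) : Int)) none)
             o (2 * curIdx + 2)
    else o
  else out1
termination_by leftHalf.length + rightHalf.length
decreasing_by
  all_goals
    simp only [PySem.List.slice_to_natCast, PySem.List.slice_from_natCast,
      List.length_take, List.length_drop, ge_iff_le, inf_le_iff]
  · omega
  · omega

def GenerateBBSTArray (a : List Int) : Option (List (Option Int)) :=
  if a.length = 0 then none
  else
    let h := bbstSize a.length 1 0 (by omega)
    let outList := List.replicate h (none : Option Int)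
    let s := PySem.List.sorted a (fun x => x) false
    some (makeAr [] s outList (-1))

-- ===== PORT B =====

-- the FIFO-queue loop of Source B: read (lo, hi, idx) at the head cursor, write a[mid] at idx,
-- append both child ranges.  The state `queue` here is Source B's queue[head:] (advancing the
-- head cursor = consuming the list head).  All indices in Source B are nonnegative ints, modelled as Nat;
-- outList[idx] = a[mid] is List.set / List.getD (idx and mid are in range whenever written).
def bfsFill (s : List Int) (queue : List (Nat × Nat × Nat)) (outList : List (Option Int)) :
    List (Option Int) :=
  match queue with
  | [] => outList
  | (lo, hi, idx) :: q =>
    if lo ≥ hi then bfsFill s q outList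
    else
      let mid := lo + (hi - lo) / 2
      bfsFill s (q ++ [(lo, mid, 2 * idx + 1), (mid + 1, hi, 2 * idx + 2)])
        (outList.set idx (some (s.getD mid 0)))
termination_by queue.length + 3 * (queue.map (fun t => t.2.1 - t.1)).sum
decreasing_by
  · simp; omega
  · simp [List.sum_append]; omega

def GenerateBBSTArray_alt (a : List Int) : Option (List (Option Int)) :=
  if a.length = 0 then none
  else
    let h := bbstSize a.length 1 0 (by omega)
    let outList := List.replicate h (none : Option Int)
    let s := PySem.List.sorted a (fun x => x) false
    some (bfsFill s [(0, a.length, 0)] outList)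

-- ===== PRECONDITION & SPEC =====
def Spec_GenerateBBSTArray (a : List Int) (out : Option (List (Option Int))) : Prop := out = GenerateBBSTArray_alt a
instance (a : List Int) (out : Option (List (Option Int))) : Decidable (Spec_GenerateBBSTArray a out) := by unfold Spec_GenerateBBSTArray; infer_instance

-- ===== CLAIM (what is proved, stated in full; the proofs are below) =====
def Claim_equal_GenerateBBSTArray : Prop := ∀ (a : List Int), Dom_GenerateBBSTArray a → Spec_GenerateBBSTArray a (GenerateBBSTArray a)

-- ===== LEMMAS AND PROOFS =====

-- The list of (index, value) writes produced for a segment placed at heap index idx.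
def segWrites (seg : List Int) (idx : Nat) : List (Nat × Int) :=
  if h : seg.length = 0 then []
  else
    let c := seg.length / 2
    (idx, seg.getD c 0) ::
      (segWrites (seg.take c) (2 * idx + 1) ++ segWrites (seg.drop (c + 1)) (2 * idx + 2))
termination_by seg.length
decreasing_by
  · simp; omega
  · simp; omega

def applyWrites (outList : List (Option Int)) (ws : List (Nat × Int)) : List (Option Int) :=
  ws.foldl (fun o p => o.set p.1 (some p.2)) outList

theorem segWrites_nil (i : Nat) : segWrites [] i = [] := by
  rw [segWrites]; simp

theorem segWrites_pos (seg : List Int) (i : Nat) (h : seg.length ≠ 0) :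
    segWrites seg i = (i, seg.getD (seg.length / 2) 0) ::
      (segWrites (seg.take (seg.length / 2)) (2 * i + 1) ++
       segWrites (seg.drop (seg.length / 2 + 1)) (2 * i + 2)) := by
  rw [segWrites]; simp [h]

theorem applyWrites_cons (out : List (Option Int)) (p : Nat × Int) (ws : List (Nat × Int)) :
    applyWrites out (p :: ws) = applyWrites (out.set p.1 (some p.2)) ws := rfl

theorem applyWrites_nil (out : List (Option Int)) : applyWrites out [] = out := rfl

theorem applyWrites_append (out : List (Option Int)) (xs ys : List (Nat × Int)) :
    applyWrites out (xs ++ ys) = applyWrites (applyWrites out xs) ys := by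
  simp [applyWrites, List.foldl_append]

-- A's recursion computes exactly the segment writes (DFS order).
theorem makeAr_aux : ∀ (n : Nat) (l r : List Int), l.length + r.length ≤ n →
    ∀ (out : List (Option Int)) (c : Nat),
    makeAr l r out (c : Int) =
      applyWrites out (segWrites l (2 * c + 1) ++ segWrites r (2 * c + 2)) := by
  intro n
  induction n with
  | zero =>
    intro l r hlen out c
    rw [List.eq_nil_of_length_eq_zero (show l.length = 0 by omega),
        List.eq_nil_of_length_eq_zero (show r.length = 0 by omega), makeAr]
    simp [segWrites_nil, applyWrites]
  | succ n ih =>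
    intro l r hlen out c
    rw [makeAr]
    have c1 : (2 * (c : Int) + 1) = ((2 * c + 1 : Nat) : Int) := by push_cast; ring
    have c2 : (2 * (c : Int) + 2) = ((2 * c + 2 : Nat) : Int) := by push_cast; ring
    simp only [c1, c2, PySem.List.pySetD_natCast, PySem.List.pyGetD_natCast,
      PySem.List.slice_to_natCast, PySem.List.slice_from_natCast, gt_iff_lt]
    split_ifs with h1 h2 h3 h4
    -- l big, r big
    · rw [ih (List.take (l.length / 2) l) (List.drop (l.length / 2 + 1) l) (by simp; omega),
          ih (List.take (r.length / 2) r) (List.drop (r.length / 2 + 1) r) (by simp; omega),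
          segWrites_pos l _ (by omega), segWrites_pos r _ (by omega)]
      simp [applyWrites_append, applyWrites_cons, applyWrites_nil]
    -- l one, r big
    · have hl0 : l.length / 2 = 0 := by omega
      have hld : l.drop 1 = [] := List.drop_eq_nil_of_le (by omega)
      rw [ih (List.take (r.length / 2) r) (List.drop (r.length / 2 + 1) r) (by simp; omega),
          segWrites_pos l _ (by omega), segWrites_pos r _ (by omega), hl0]
      simp [hld, segWrites_nil, applyWrites_append, applyWrites_cons, applyWrites_nil]
    -- l empty, r big
    · have hl : l = [] := List.eq_nil_of_length_eq_zero (by omega)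
      subst hl
      rw [ih (List.take (r.length / 2) r) (List.drop (r.length / 2 + 1) r) (by simp; omega),
          segWrites_pos r _ (by omega)]
      simp [segWrites_nil, applyWrites_append, applyWrites_cons, applyWrites_nil]
    -- l big, r one
    · have hr0 : r.length / 2 = 0 := by omega
      have hrd : r.drop 1 = [] := List.drop_eq_nil_of_le (by omega)
      rw [ih (List.take (l.length / 2) l) (List.drop (l.length / 2 + 1) l) (by simp; omega),
          segWrites_pos l _ (by omega), segWrites_pos r _ (by omega), hr0]
      simp [hrd, segWrites_nil, applyWrites_append, applyWrites_cons, applyWrites_nil]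
    -- l one, r one
    · have hl0 : l.length / 2 = 0 := by omega
      have hr0 : r.length / 2 = 0 := by omega
      have hld : l.drop 1 = [] := List.drop_eq_nil_of_le (by omega)
      have hrd : r.drop 1 = [] := List.drop_eq_nil_of_le (by omega)
      rw [segWrites_pos l _ (by omega), segWrites_pos r _ (by omega), hl0, hr0]
      simp [hld, hrd, segWrites_nil, applyWrites_append, applyWrites_cons, applyWrites_nil]
    -- l empty, r one
    · have hl : l = [] := List.eq_nil_of_length_eq_zero (by omega)
      subst hl
      have hr0 : r.length / 2 = 0 := by omega
      have hrd : r.drop 1 = [] := List.drop_eq_nil_of_le (by omega)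
      rw [segWrites_pos r _ (by omega), hr0]
      simp [hrd, segWrites_nil, applyWrites_append, applyWrites_cons, applyWrites_nil]
    -- l big, r empty
    · have hr : r = [] := List.eq_nil_of_length_eq_zero (by omega)
      subst hr
      rw [ih (List.take (l.length / 2) l) (List.drop (l.length / 2 + 1) l) (by simp; omega),
          segWrites_pos l _ (by omega)]
      simp [segWrites_nil, applyWrites_append, applyWrites_cons, applyWrites_nil]
    -- l one, r empty
    · have hr : r = [] := List.eq_nil_of_length_eq_zero (by omega)
      subst hr
      have hl0 : l.length / 2 = 0 := by omega
      have hld : l.drop 1 = [] := List.drop_eq_nil_of_le (by omega)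
      rw [segWrites_pos l _ (by omega), hl0]
      simp [hld, segWrites_nil, applyWrites_append, applyWrites_cons, applyWrites_nil]
    -- both empty
    · rw [List.eq_nil_of_length_eq_zero (show l.length = 0 by omega),
          List.eq_nil_of_length_eq_zero (show r.length = 0 by omega)]
      simp [segWrites_nil, applyWrites]

theorem makeAr_eq_applyWrites (l r : List Int) (out : List (Option Int)) (c : Nat) :
    makeAr l r out (c : Int) =
      applyWrites out (segWrites l (2 * c + 1) ++ segWrites r (2 * c + 2)) :=
  makeAr_aux (l.length + r.length) l r le_rfl out c

theorem makeAr_top (r : List Int) (out : List (Option Int)) :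
    makeAr [] r out (-1) = applyWrites out (segWrites r 0) := by
  rw [makeAr]
  have c2 : (2 * (-1 : Int) + 2) = ((0 : Nat) : Int) := by norm_num
  simp only [c2, PySem.List.pySetD_natCast, PySem.List.pyGetD_natCast,
    PySem.List.slice_to_natCast, PySem.List.slice_from_natCast, gt_iff_lt, List.length_nil,
    Nat.lt_irrefl, if_false]
  split_ifs with h1 h2
  · rw [makeAr_eq_applyWrites, segWrites_pos r _ (by omega)]
    simp [applyWrites_append, applyWrites_cons, applyWrites_nil]
  · have hr0 : r.length / 2 = 0 := by omega
    have hrd : r.drop 1 = [] := List.drop_eq_nil_of_le (by omega)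
    rw [segWrites_pos r _ (by omega), hr0]
    simp [hrd, segWrites_nil, applyWrites_append, applyWrites_cons, applyWrites_nil]
  · have hr : r = [] := List.eq_nil_of_length_eq_zero (by omega)
    subst hr
    simp [segWrites_nil, applyWrites_nil]

-- ancestor relation on heap indices: j lies in the subtree rooted at i
def heapAnc (i j : Nat) : Prop := ∃ m, (j + 1) / 2 ^ m = i + 1

theorem heapAnc_le {i j : Nat} (h : heapAnc i j) : i ≤ j := by
  obtain ⟨m, hm⟩ := h
  have := Nat.div_le_self (j + 1) (2 ^ m)
  omega

theorem heapAnc_trans {i j k : Nat} (h1 : heapAnc i j) (h2 : heapAnc j k) : heapAnc i k := by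
  obtain ⟨m, hm⟩ := h1; obtain ⟨n, hn⟩ := h2
  exact ⟨n + m, by rw [pow_add, ← Nat.div_div_eq_div_mul, hn, hm]⟩

theorem heapAnc_disjoint {i j : Nat} (h1 : heapAnc (2 * i + 1) j) (h2 : heapAnc (2 * i + 2) j) :
    False := by
  obtain ⟨m, hm⟩ := h1; obtain ⟨k, hk⟩ := h2
  have hkm : k < m := by
    by_contra hc
    have : (j + 1) / 2 ^ k ≤ (j + 1) / 2 ^ m :=
      Nat.div_le_div_left (Nat.pow_le_pow_right (by omega) (by omega)) (by positivity)
    omega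
  have hexp : k + (m - k) = m := by omega
  have heq : (j + 1) / 2 ^ m = ((j + 1) / 2 ^ k) / 2 ^ (m - k) := by
    rw [Nat.div_div_eq_div_mul, ← pow_add, hexp]
  rw [hk, hm] at heq
  have h2 : 2 ≤ 2 ^ (m - k) := by
    calc 2 = 2 ^ 1 := rfl
    _ ≤ 2 ^ (m - k) := Nat.pow_le_pow_right (by omega) (by omega)
  have hle : (2 * i + 3) / 2 ^ (m - k) ≤ (2 * i + 3) / 2 := Nat.div_le_div_left h2 (by omega)
  rw [← heq] at hle
  omega

theorem heapAnc_self (i : Nat) : heapAnc i i := ⟨0, by simp⟩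

theorem heapAnc_left (i : Nat) : heapAnc i (2 * i + 1) := ⟨1, by omega⟩

theorem heapAnc_right (i : Nat) : heapAnc i (2 * i + 2) := ⟨1, by omega⟩

theorem mem_segWrites_anc_aux : ∀ (n : Nat) (seg : List Int), seg.length ≤ n →
    ∀ (i : Nat) (p : Nat × Int), p ∈ segWrites seg i → heapAnc i p.1 := by
  intro n
  induction n with
  | zero =>
    intro seg hlen i p hp
    have : seg = [] := List.eq_nil_of_length_eq_zero (by omega)
    rw [this, segWrites_nil] at hp; cases hp
  | succ n ih =>
    intro seg hlen i p hp
    by_cases h0 : seg.length = 0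
    · rw [List.eq_nil_of_length_eq_zero h0, segWrites_nil] at hp; cases hp
    · rw [segWrites_pos seg i h0] at hp
      rcases List.mem_cons.mp hp with hph | hp'
      · rw [hph]; exact heapAnc_self i
      · rcases List.mem_append.mp hp' with hl | hr
        · have hanc := ih (seg.take (seg.length / 2)) (by simp; omega) (2 * i + 1) p hl
          exact heapAnc_trans (heapAnc_left i) hanc
        · have hanc := ih (seg.drop (seg.length / 2 + 1)) (by simp; omega) (2 * i + 2) p hr
          exact heapAnc_trans (heapAnc_right i) hanc

theorem mem_segWrites_anc (seg : List Int) (i : Nat) (p : Nat × Int)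
    (hp : p ∈ segWrites seg i) : heapAnc i p.1 :=
  mem_segWrites_anc_aux seg.length seg le_rfl i p hp

theorem anc_of_mem_map_fst {seg : List Int} {i j : Nat}
    (hj : j ∈ (segWrites seg i).map Prod.fst) : heapAnc i j := by
  rcases List.mem_map.mp hj with ⟨p, hp, hpe⟩
  exact hpe ▸ mem_segWrites_anc seg i p hp

theorem nodup_segWrites_fst_aux : ∀ (n : Nat) (seg : List Int), seg.length ≤ n →
    ∀ (i : Nat), ((segWrites seg i).map Prod.fst).Nodup := by
  intro n
  induction n with
  | zero =>
    intro seg hlen i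
    rw [List.eq_nil_of_length_eq_zero (show seg.length = 0 by omega), segWrites_nil]; simp
  | succ n ih =>
    intro seg hlen i
    by_cases h0 : seg.length = 0
    · rw [List.eq_nil_of_length_eq_zero h0, segWrites_nil]; simp
    · rw [segWrites_pos seg i h0]
      simp only [List.map_cons, List.map_append, List.nodup_cons]
      refine ⟨?_, List.Nodup.append (ih _ (by simp; omega) _) (ih _ (by simp; omega) _) ?_⟩
      · intro hmem
        rcases List.mem_append.mp hmem with hl | hr
        · exact absurd (heapAnc_le (anc_of_mem_map_fst hl)) (by omega)
        · exact absurd (heapAnc_le (anc_of_mem_map_fst hr)) (by omega)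
      · intro j hjl hjr
        exact heapAnc_disjoint (anc_of_mem_map_fst hjl) (anc_of_mem_map_fst hjr)

theorem nodup_segWrites_fst (seg : List Int) (i : Nat) :
    ((segWrites seg i).map Prod.fst).Nodup :=
  nodup_segWrites_fst_aux seg.length seg le_rfl i

-- permutation invariance of applyWrites when the written indices are pairwise distinct
theorem applyWrites_perm (out : List (Option Int)) {ws ws' : List (Nat × Int)}
    (hperm : ws.Perm ws') (hnd : (ws.map Prod.fst).Nodup) :
    applyWrites out ws = applyWrites out ws' := by
  simp only [applyWrites]
  refine hperm.foldl_eq' ?_ out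
  intro p hp q hq o
  by_cases hpq : p.1 = q.1
  · have : p = q := List.inj_on_of_nodup_map hnd hp hq hpq
    rw [this]
  · exact List.set_comm (some p.2) (some q.2) hpq

-- B's queue loop applies the writes of all queued segments (in BFS order).
def bfsWrites (s : List Int) (queue : List (Nat × Nat × Nat)) : List (Nat × Int) :=
  match queue with
  | [] => []
  | (lo, hi, idx) :: q =>
    if lo ≥ hi then bfsWrites s q
    else
      let mid := lo + (hi - lo) / 2
      (idx, s.getD mid 0) ::
        bfsWrites s (q ++ [(lo, mid, 2 * idx + 1), (mid + 1, hi, 2 * idx + 2)])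
termination_by queue.length + 3 * (queue.map (fun t => t.2.1 - t.1)).sum
decreasing_by
  · simp; omega
  · simp [List.sum_append]; omega

theorem bfsFill_eq_applyWrites : ∀ (s : List Int) (q : List (Nat × Nat × Nat))
    (out : List (Option Int)), bfsFill s q out = applyWrites out (bfsWrites s q) := by
  intro s q out
  fun_induction bfsFill s q out with
  | case1 out => rw [bfsWrites]; rfl
  | case2 out lo hi idx q hge ih => rw [bfsWrites]; simpa [hge] using ih
  | case3 out lo hi idx q hge mid ih => rw [bfsWrites]; simpa [hge, applyWrites_cons] using ih

def itemWrites (s : List Int) (t : Nat × Nat × Nat) : List (Nat × Int) :=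
  segWrites ((s.drop t.1).take (t.2.1 - t.1)) t.2.2

theorem bfsWrites_perm_flat_aux : ∀ (N : Nat) (s : List Int) (q : List (Nat × Nat × Nat)),
    q.length + 3 * (q.map (fun t => t.2.1 - t.1)).sum ≤ N →
    (∀ t ∈ q, t.2.1 ≤ s.length) → (bfsWrites s q).Perm (q.flatMap (itemWrites s)) := by
  intro N
  induction N with
  | zero =>
    intro s q hN hq
    have : q = [] := List.eq_nil_of_length_eq_zero (by omega)
    subst this; rw [bfsWrites]; simp
  | succ N ih =>
    intro s q hN hq
    match q with
    | [] => rw [bfsWrites]; simp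
    | (lo, hi, idx) :: q =>
      by_cases hge : lo ≥ hi
      · have hseg : (hi - lo : Nat) = 0 := by omega
        rw [bfsWrites]
        simp only [hge, if_true, ge_iff_le]
        have hperm := ih s q (by simp at hN ⊢; omega) (fun t ht => hq t (List.mem_cons_of_mem _ ht))
        simp only [List.flatMap_cons, itemWrites, hseg, List.take_zero, segWrites_nil,
          List.nil_append]
        simpa [hge] using hperm
      · -- processing case
        have hhi : hi ≤ s.length := hq (lo, hi, idx) List.mem_cons_self
        have hch : ∀ t ∈ q ++ [(lo, lo + (hi - lo) / 2, 2 * idx + 1),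
            (lo + (hi - lo) / 2 + 1, hi, 2 * idx + 2)], t.2.1 ≤ s.length := by
          intro t ht
          rcases List.mem_append.mp ht with h | h
          · exact hq t (List.mem_cons_of_mem _ h)
          · simp at h
            rcases h with h | h <;> (rw [h]; simp; omega)
        have hmeas : (q ++ [(lo, lo + (hi - lo) / 2, 2 * idx + 1),
            (lo + (hi - lo) / 2 + 1, hi, 2 * idx + 2)]).length +
            3 * ((q ++ [(lo, lo + (hi - lo) / 2, 2 * idx + 1),
              (lo + (hi - lo) / 2 + 1, hi, 2 * idx + 2)]).map
              (fun t => t.2.1 - t.1)).sum ≤ N := by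
          simp [List.sum_append] at hN ⊢; omega
        have hperm := ih s _ hmeas hch
        rw [List.flatMap_append] at hperm
        have hlen : ((s.drop lo).take (hi - lo)).length = hi - lo := by simp; omega
        -- identify the three segment-write lists
        have e1 : ((s.drop lo).take (hi - lo)).getD ((hi - lo) / 2) 0 =
            s.getD (lo + (hi - lo) / 2) 0 := by
          simp only [List.getD_eq_getElem?_getD]
          rw [List.getElem?_take_of_lt (by omega), List.getElem?_drop]
        have e2 : ((s.drop lo).take (hi - lo)).take ((hi - lo) / 2) =
            (s.drop lo).take (lo + (hi - lo) / 2 - lo) := by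
          have h4 : lo + (hi - lo) / 2 - lo = (hi - lo) / 2 := by omega
          rw [h4, List.take_take, Nat.min_eq_left (by omega)]
        have e3 : ((s.drop lo).take (hi - lo)).drop ((hi - lo) / 2 + 1) =
            (s.drop (lo + (hi - lo) / 2 + 1)).take (hi - (lo + (hi - lo) / 2 + 1)) := by
          rw [List.drop_take, List.drop_drop]
          congr 1 <;> omega
        have hseg : itemWrites s (lo, hi, idx) =
            (idx, s.getD (lo + (hi - lo) / 2) 0) ::
              (itemWrites s (lo, lo + (hi - lo) / 2, 2 * idx + 1) ++
               itemWrites s (lo + (hi - lo) / 2 + 1, hi, 2 * idx + 2)) := by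
          rw [itemWrites, segWrites_pos _ _ (by rw [hlen]; omega)]
          rw [hlen, e1, e2, e3]
          rfl
        rw [bfsWrites]
        simp only [hge, if_false]
        have hstep := (hperm.trans (List.perm_append_comm)).trans
          (List.Perm.of_eq (by simp) :
            ([(lo, lo + (hi - lo) / 2, 2 * idx + 1),
              (lo + (hi - lo) / 2 + 1, hi, 2 * idx + 2)].flatMap (itemWrites s) ++
              q.flatMap (itemWrites s)).Perm
            (itemWrites s (lo, lo + (hi - lo) / 2, 2 * idx + 1) ++
              (itemWrites s (lo + (hi - lo) / 2 + 1, hi, 2 * idx + 2) ++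
                q.flatMap (itemWrites s))))
        simp only [List.flatMap_cons, hseg, List.cons_append, List.append_assoc]
        exact (hstep.cons (idx, s.getD (lo + (hi - lo) / 2) 0))

theorem bfsWrites_perm_flat (s : List Int) (q : List (Nat × Nat × Nat))
    (hq : ∀ t ∈ q, t.2.1 ≤ s.length) : (bfsWrites s q).Perm (q.flatMap (itemWrites s)) :=
  bfsWrites_perm_flat_aux _ s q le_rfl hq

-- ===== VERDICT (by name: the statement is the Claim_ definition above) =====
theorem sorted_segWrites_bridge (a : List Int) (out : List (Option Int)) :
    makeAr [] (PySem.List.sorted a (fun x => x) false) out (-1) =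
      bfsFill (PySem.List.sorted a (fun x => x) false) [(0, a.length, 0)] out := by
  set s := PySem.List.sorted a (fun x => x) false with hs
  have hlen_s : s.length = a.length := by
    rw [hs]; exact PySem.List.length_sorted a (fun x => x) false
  have hperm : (bfsWrites s [(0, a.length, 0)]).Perm (segWrites s 0) := by
    have h := bfsWrites_perm_flat s [(0, a.length, 0)]
      (by intro t ht; simp at ht; rw [ht]; simp [hlen_s])
    have hflat : [((0 : Nat), a.length, (0 : Nat))].flatMap (itemWrites s) = segWrites s 0 := by
      simp only [List.flatMap_cons, List.flatMap_nil, List.append_nil, itemWrites,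
        List.drop_zero, Nat.sub_zero]
      rw [← hlen_s, List.take_length]
    rw [hflat] at h
    exact h
  rw [makeAr_top, bfsFill_eq_applyWrites]
  exact applyWrites_perm out hperm.symm (nodup_segWrites_fst s 0)

theorem GenerateBBSTArray_spec : Claim_equal_GenerateBBSTArray := by
  intro a _hdom
  show GenerateBBSTArray a = GenerateBBSTArray_alt a
  rw [GenerateBBSTArray, GenerateBBSTArray_alt]
  by_cases ha : a.length = 0
  · simp [ha]
  · simp only [ha, if_false]
    exact congrArg some (sorted_segWrites_bridge a _)
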